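-- pv_equiv track=rewrite | github.com/Sharath44665/neetcode_150 | dsa/07hashingInPython/demo05.py | findStringOccurence
-- ===== SOURCE A (Python) =====
-- def findStringOccurence(s,q):
--     # time complexity = o(N+M) where n is len(s), m is len(q)
--     # space complexity = o(1+l) where l is len(q)
--     stringMap={}
--     result = []
--     for val in s:
--         stringMap[val] = stringMap.get(val,0) + 1
--
--     for val in q:
--         result.append(stringMap.get(val,0))
--     return result
--     pass
-- ===== SOURCE B (Python) =====
-- def findStringOccurence(s, q):
--     # Inverted index over the QUERIES: map each query char to its result slots,
--     # then a single pass over s bumps those slots in place.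
--     positions = {}
--     for i, val in enumerate(q):
--         positions.setdefault(val, []).append(i)
--     result = [0] * len(q)
--     for c in s:
--         for i in positions.get(c, []):
--             result[i] += 1
--     return result
-- ===== Notes on version B (the rewrite author's own statement) =====
-- stated objective: alternative
-- what changed: Inverts the indexing direction: instead of a frequency dict over s looked up per query, B builds an inverted index mapping each query character to its result positions and makes one pass over s that increments those slots of a preallocated result array in place.
import Mathlib
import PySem

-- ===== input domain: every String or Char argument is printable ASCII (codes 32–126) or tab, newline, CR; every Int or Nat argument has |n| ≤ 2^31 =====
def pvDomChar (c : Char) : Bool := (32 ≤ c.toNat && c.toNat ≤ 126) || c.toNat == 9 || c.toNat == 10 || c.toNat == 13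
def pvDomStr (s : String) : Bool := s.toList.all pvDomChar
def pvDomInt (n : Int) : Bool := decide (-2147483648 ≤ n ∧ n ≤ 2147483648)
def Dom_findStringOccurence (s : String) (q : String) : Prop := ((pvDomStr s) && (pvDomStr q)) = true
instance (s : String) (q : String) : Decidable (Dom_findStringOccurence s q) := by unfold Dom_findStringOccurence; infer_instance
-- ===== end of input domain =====

-- B inverts the indexing direction: an index over q's result slots and one in-place bump pass over s (alternative algorithm, same result).

-- ===== PORT A =====
-- A: frequency dict over s, then one lookup per query character
def findStringOccurence (s : String) (q : String) : List Int :=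
  let stringMap : PySem.Dict Char Int :=
    s.toList.foldl (fun d val => d.insert val (d.getD val 0 + 1)) PySem.Dict.empty
  let result : List Int :=
    q.toList.foldl (fun r val => r ++ [stringMap.getD val 0]) []
  result

-- ===== PORT B =====
-- B: positions maps each query char to the list of its (enumerate) indices in q;
-- 'positions.setdefault(val, []).append(i)' is d[val] = d.get(val, []) + [i], i.e. Dict.modify.
-- 'result[i] += 1': i is a nonnegative in-range enumerate index, so i.toNat is exact.
def findStringOccurence_alt (s : String) (q : String) : List Int :=
  let positions : PySem.Dict Char (List Int) :=
    (PySem.List.enumerate q.toList 0).foldl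
      (fun d p => d.modify p.2 [] (· ++ [p.1])) PySem.Dict.empty
  let result : List Int := List.replicate q.toList.length 0
  s.toList.foldl
    (fun r c => (positions.getD c []).foldl
      (fun r i => r.set i.toNat (r.getD i.toNat 0 + 1)) r) result

-- ===== PRECONDITION & SPEC =====
def Spec_findStringOccurence (s : String) (q : String) (out : List Int) : Prop := out = findStringOccurence_alt s q
instance (s : String) (q : String) (out : List Int) : Decidable (Spec_findStringOccurence s q out) := by unfold Spec_findStringOccurence; infer_instance

-- ===== CLAIM (what is proved, stated in full; the proofs are below) =====
def Claim_equal_findStringOccurence : Prop := ∀ (s : String) (q : String), Dom_findStringOccurence s q → Spec_findStringOccurence s q (findStringOccurence s q)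

-- ===== LEMMAS AND PROOFS =====

theorem positions_getD (q : List Char) (c : Char) :
    ((PySem.List.enumerate q 0).foldl
        (fun d p => d.modify p.2 [] (· ++ [p.1])) PySem.Dict.empty).getD c []
      = ((PySem.List.enumerate q 0).filter (fun p => p.2 == c)).map (·.1) := by
  rw [show ((PySem.List.enumerate q 0).foldl
        (fun (d : PySem.Dict Char (List Int)) p => d.modify p.2 [] (· ++ [p.1])) PySem.Dict.empty)
      = (((PySem.List.enumerate q 0).map Prod.swap).foldl
        (fun d p => d.modify p.1 [] (· ++ [p.2])) PySem.Dict.empty) by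
    rw [List.foldl_map]; rfl]
  rw [PySem.Dict.getD_foldl_modify_append]
  simp [List.filter_map, Function.comp_def, Prod.swap]

theorem positions_mem_range (q : List Char) (c : Char) (i : Int)
    (h : i ∈ ((PySem.List.enumerate q 0).filter (fun p => p.2 == c)).map (·.1)) :
    0 ≤ i ∧ i < (q.length : Int) := by
  obtain ⟨p, hp, rfl⟩ := List.mem_map.mp h
  obtain ⟨k, hk, rfl⟩ := (PySem.List.mem_enumerate_iff _ _ _).mp (List.mem_filter.mp hp).1
  simp
  omega

theorem inc_length (idxs : List Int) (r : List Int) :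
    (idxs.foldl (fun r i => r.set i.toNat (r.getD i.toNat 0 + 1)) r).length = r.length := by
  induction idxs generalizing r with
  | nil => rfl
  | cons i t ih => rw [List.foldl_cons, ih, List.length_set]

theorem inc_getElem (idxs : List Int) (r : List Int) (h0 : ∀ i ∈ idxs, 0 ≤ i)
    (j : Nat) (hj : j < r.length) :
    (idxs.foldl (fun r i => r.set i.toNat (r.getD i.toNat 0 + 1)) r)[j]'(by
        rw [inc_length]; exact hj)
      = r[j] + idxs.count ((j : Nat) : Int) := by
  induction idxs generalizing r with
  | nil => simp
  | cons i t ih =>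
    have hi : 0 ≤ i := h0 i (by simp)
    have ht : ∀ x ∈ t, 0 ≤ x := fun x hx => h0 x (by simp [hx])
    simp only [List.foldl_cons]
    rw [ih (r.set i.toNat (r.getD i.toNat 0 + 1)) ht (by simpa using hj)]
    by_cases hij : i = (j : Int)
    · have hh : i.toNat = j := by omega
      rw [hh, List.getElem_set_self, List.getD_eq_getElem r 0 hj]
      simp [hij]
      omega
    · have hne : i.toNat ≠ j := by omega
      rw [List.getElem_set_ne hne]
      simp [hij]

theorem count_idx (c : Char) (l : List Char) (n j : Nat) (hj : j < l.length) :
    (((PySem.List.enumerate l (n : Int)).filter (fun p => p.2 == c)).map (·.1)).count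
        (((n + j : Nat) : Int))
      = if l[j] = c then 1 else 0 := by
  induction l generalizing n j with
  | nil => simp at hj
  | cons a t ih =>
    rw [PySem.List.enumerate_cons]
    have hz : (((PySem.List.enumerate t ((n : Int) + 1)).filter (fun p => p.2 == c)).map
        (fun x => x.1)).count ((n : Int)) = 0 := by
      rw [List.count_eq_zero]
      intro hmem
      obtain ⟨p, hp, hpe⟩ := List.mem_map.mp hmem
      obtain ⟨k, hk, rfl⟩ := (PySem.List.mem_enumerate_iff _ _ _).mp (List.mem_filter.mp hp).1
      simp at hpe
      omega
    cases j with
    | zero =>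
      simp only [Nat.add_zero, List.getElem_cons_zero]
      by_cases hac : a = c
      · simp [hac, hz]
      · simp [hac, hz, show (a == c) = false by simp [hac]]
    | succ j' =>
      have hj' : j' < t.length := by simpa using hj
      have hih := ih (n + 1) j' hj'
      push_cast at hih
      have he : ((n : Int) + 1 + (j' : Int)) = (n : Int) + ((j' : Int) + 1) := by ring
      rw [he] at hih
      by_cases hac : a = c
      · push_cast
        simp only [List.filter_cons, hac, beq_self_eq_true, if_true, List.map_cons,
          List.count_cons, List.getElem_cons_succ]
        have hne2 : ¬ ((n : Int) = (n : Int) + ((j' : Int) + 1)) := by omega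
        simp [hih, hne2]
      · have hbc : (a == c) = false := by simp [hac]
        push_cast
        simp only [List.filter_cons, hbc, Bool.false_eq_true, if_false, List.getElem_cons_succ]
        exact hih

-- B's scan over any character list yields the per-query counts of that list
theorem B_loop (q : List Char) (l : List Char) :
    l.foldl
      (fun r c => (((PySem.List.enumerate q 0).foldl
          (fun d p => d.modify p.2 [] (· ++ [p.1])) PySem.Dict.empty).getD c []).foldl
        (fun r i => r.set i.toNat (r.getD i.toNat 0 + 1)) r)
      (List.replicate q.length 0)
      = q.map (fun v => ((l.count v : Nat) : Int)) := by
  induction l using List.reverseRecOn with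
  | nil =>
    apply List.ext_getElem (by simp)
    intro j h1 h2
    simp
  | append_singleton l c ih =>
    rw [List.foldl_append, ih, List.foldl_cons, List.foldl_nil]
    apply List.ext_getElem
    · rw [inc_length]; simp
    · intro j h1 h2
      have hjq : j < q.length := by
        have := h1; rw [inc_length] at this; simpa using this
      rw [inc_getElem _ _ (fun i hi => by
            rw [positions_getD] at hi
            exact (positions_mem_range q c i hi).1) j (by simpa using hjq)]
      rw [positions_getD]
      have hcnt := count_idx c q 0 j hjq
      simp only [Nat.zero_add, Nat.cast_zero] at hcnt
      rw [List.getElem_map, List.getElem_map, hcnt]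
      by_cases h : q[j] = c
      · subst h
        simp [List.count_append]
      · have hcs : c ≠ q[j] := fun hh => h hh.symm
        simp [h, hcs, List.count_append]

-- ===== VERDICT (by name: the statement is the Claim_ definition above) =====
theorem findStringOccurence_spec : Claim_equal_findStringOccurence := by
  intro s q _
  show findStringOccurence s q = findStringOccurence_alt s q
  unfold findStringOccurence findStringOccurence_alt
  simp only [PySem.Dict.foldl_insert_getD_add_one_eq_counter,
    PySem.List.foldl_append_singleton_eq_map]
  rw [B_loop]
  apply List.map_congr_left
  intro v _
  rw [PySem.Dict.getD_counter]
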